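-- pv_equiv track=rewrite | github.com/rabbottz/Word-Counter | counter.py | freq_table
-- ===== SOURCE A (Python) =====
-- def freq_table(string_in):
--     count_dict = {}
--     word_lst = string_in.split()
--     for word in word_lst:
--         if word[0] in count_dict:
--             count_dict[word[0]] = count_dict[word[0]] + 1
--         else:
--             count_dict[word[0]] = 1
--     return count_dict
-- ===== SOURCE B (Python) =====
-- def freq_table(string_in):
--     firsts = [w[0] for w in string_in.split()]
--     return {c: firsts.count(c) for c in dict.fromkeys(firsts)}
-- ===== Notes on version B (the rewrite author's own statement) =====
-- stated objective: alternative
-- what changed: Replaces the single pass that increments a dict entry per word with a two-phase strategy: collect the first characters, deduplicate them in first-occurrence order with dict.fromkeys, then count each distinct character with list.count.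
import Mathlib
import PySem

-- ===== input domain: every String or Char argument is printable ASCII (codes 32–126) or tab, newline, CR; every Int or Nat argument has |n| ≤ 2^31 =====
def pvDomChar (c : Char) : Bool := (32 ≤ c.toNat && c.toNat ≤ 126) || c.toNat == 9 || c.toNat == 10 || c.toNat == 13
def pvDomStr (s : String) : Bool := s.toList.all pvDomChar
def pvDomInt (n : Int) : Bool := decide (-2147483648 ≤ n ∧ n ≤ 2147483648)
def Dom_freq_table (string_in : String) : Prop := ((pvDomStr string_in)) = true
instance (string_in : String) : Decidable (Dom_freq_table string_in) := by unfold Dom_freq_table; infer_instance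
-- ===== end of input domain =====

-- B counts words per first character in two phases (dedup first-occurrence keys, then count each) instead of A's single incrementing-dict pass; alternative decomposition, no speed claim.

-- ===== PORT A =====
-- w[0] of a word from split(): split() words are non-empty, so the [] case is unreachable.
def firstKey (w : List Char) : String :=
  match w with
  | [] => ""
  | c :: _ => String.ofList [c]

def freq_table (string_in : String) : List (String × Int) :=
  ((PySem.Chars.split₀ string_in.toList).foldl (fun d word =>
      let k := firstKey word
      if PySem.Dict.contains d k then
        PySem.Dict.insert d k (PySem.Dict.getD d k 0 + 1)
      else
        PySem.Dict.insert d k 1)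
    PySem.Dict.empty).items

-- ===== PORT B =====
def freq_table_alt (string_in : String) : List (String × Int) :=
  let firsts := (PySem.Chars.split₀ string_in.toList).map firstKey
  (PySem.List.dedup firsts).map (fun c => (c, (firsts.count c : Int)))

-- ===== PRECONDITION & SPEC =====
def Spec_freq_table (string_in : String) (out : List (String × Int)) : Prop := out = freq_table_alt string_in
instance (string_in : String) (out : List (String × Int)) : Decidable (Spec_freq_table string_in out) := by unfold Spec_freq_table; infer_instance

-- ===== CLAIM (what is proved, stated in full; the proofs are below) =====
def Claim_equal_freq_table : Prop := ∀ (string_in : String), Dom_freq_table string_in → Spec_freq_table string_in (freq_table string_in)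

-- ===== LEMMAS AND PROOFS =====

-- A's branch on membership is one uniform counter step: when the key is absent getD returns 0.
theorem freq_table_step (d : PySem.Dict String Int) (k : String) :
    (if PySem.Dict.contains d k then
        PySem.Dict.insert d k (PySem.Dict.getD d k 0 + 1)
      else
        PySem.Dict.insert d k 1)
      = PySem.Dict.insert d k (PySem.Dict.getD d k 0 + 1) := by
  by_cases h : PySem.Dict.contains d k = true
  · simp [h]
  · simp only [Bool.not_eq_true] at h
    simp [h, PySem.Dict.getD_of_not_contains d 0 h]

-- ===== VERDICT (by name: the statement is the Claim_ definition above) =====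
theorem freq_table_spec : Claim_equal_freq_table := by
  intro s _
  unfold Spec_freq_table freq_table freq_table_alt
  simp only [freq_table_step]
  have hm :
      List.foldl (fun (d : PySem.Dict String Int) word =>
          d.insert (firstKey word) (d.getD (firstKey word) 0 + 1))
        PySem.Dict.empty (PySem.Chars.split₀ s.toList)
      = List.foldl (fun d k => d.insert k (d.getD k 0 + 1)) PySem.Dict.empty
          ((PySem.Chars.split₀ s.toList).map firstKey) :=
    by rw [List.foldl_map]
  rw [hm, PySem.Dict.foldl_insert_getD_add_one_eq_counter, PySem.Dict.items_counter]
  rfl
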